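-- pv_equiv track=rewrite | github.com/ahuraira/integrated-hr-recruitment-tracker | ai_processing_azure_functions/documentation/pii_redaction_system_v2_improved.py | _apply_span_replacements
-- ===== SOURCE A (Python) =====
-- from typing import List, Dict, Tuple, Any
--
-- def _apply_span_replacements(text: str, replacements: List[Tuple[int, int, str]]) -> str:
--     """Apply span-based replacements efficiently"""
--     if not replacements:
--         return text
--
--     # Sort by start position and validate non-overlap
--     replacements_sorted = sorted(replacements, key=lambda r: r[0])
--
--     # Build result by processing from end to start
--     result_parts = []
--     current_pos = len(text)
--
--     for start, end, replacement in reversed(replacements_sorted):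
--         result_parts.append(text[end:current_pos])
--         result_parts.append(replacement)
--         current_pos = start
--
--     result_parts.append(text[:current_pos])
--
--     return ''.join(reversed(result_parts))
-- ===== SOURCE B (Python) =====
-- from typing import List, Tuple
--
-- def _apply_span_replacements(text: str, replacements: List[Tuple[int, int, str]]) -> str:
--     """Selection-based stitching: repeatedly extract the first span with the
--     minimal start (min is stable, so ties keep original order, exactly like a
--     stable sort) and splice it in, accumulating the output string directly."""
--     spans = list(replacements)
--     out = ""
--     pos = 0
--     while spans:
--         m = min(spans, key=lambda t: t[0])
--         spans.remove(m)
--         start, end, replacement = m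
--         out += text[pos:start] + replacement
--         pos = end
--     return out + text[pos:]
-- ===== Notes on version B (the rewrite author's own statement) =====
-- stated objective: alternative
-- what changed: Replaces A's sort-then-stitch (timsort, backward traversal building a reversed parts list, ''.join) with a selection loop: repeatedly extract the span with the minimal start (min is stable on ties, matching A's stable sort) and splice text[pos:start]+replacement directly onto a string accumulator; no sorted(), no parts list, no join, no reversal.
import Mathlib
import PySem

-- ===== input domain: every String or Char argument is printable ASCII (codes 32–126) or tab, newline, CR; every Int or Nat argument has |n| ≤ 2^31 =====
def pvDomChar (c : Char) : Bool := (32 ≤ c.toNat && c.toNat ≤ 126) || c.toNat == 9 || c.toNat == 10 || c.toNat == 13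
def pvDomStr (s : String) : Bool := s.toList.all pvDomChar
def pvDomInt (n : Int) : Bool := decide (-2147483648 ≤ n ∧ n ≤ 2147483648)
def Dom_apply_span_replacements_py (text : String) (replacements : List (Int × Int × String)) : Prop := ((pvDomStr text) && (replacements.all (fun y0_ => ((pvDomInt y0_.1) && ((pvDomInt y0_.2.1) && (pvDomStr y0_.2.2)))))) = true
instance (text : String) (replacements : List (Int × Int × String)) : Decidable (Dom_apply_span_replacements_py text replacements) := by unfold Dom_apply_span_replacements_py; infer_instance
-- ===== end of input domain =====

-- B replaces A's sort-then-stitch (stable sort, backward parts list, join of the reverse) with a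
-- selection loop: repeatedly extract the first span of minimal start and splice it directly onto a
-- string accumulator — no sort call, no parts list, no join; alternative decomposition, same result.


-- ===== PORT A =====
-- Literal port of A: sort by start (stable), iterate the sorted spans in REVERSE appending
-- text[end:current_pos] then the replacement, with current_pos starting at len(text);
-- finally append text[:current_pos] and join the REVERSED parts list.
def apply_span_replacements_py (text : String) (replacements : List (Int × Int × String)) : String :=
  if replacements = [] then text
  else
    let replacements_sorted := PySem.List.sorted replacements (fun r => r.1) false
    let st := replacements_sorted.reverse.foldl
      (fun (acc : List String × Int) r =>
        (acc.1 ++ [PySem.Str.slice text (some r.2.1) (some acc.2), r.2.2], r.1))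
      ([], PySem.Str.len text)
    PySem.Str.join "" (st.1 ++ [PySem.Str.slice text none (some st.2)]).reverse

-- ===== PORT B =====
-- termination helper for pvSelLoop (cited in its decreasing_by): removing an element shortens the list
theorem pvRemoveLen (xs : List (Int × Int × String)) (m : Int × Int × String) (hx : xs ≠ []) :
    ((PySem.List.remove? xs m).getD []).length < xs.length := by
  unfold PySem.List.remove?
  cases hi : List.idxOf? m xs with
  | none => simpa using List.length_pos_of_ne_nil hx
  | some k =>
      have hk : k < xs.length := by
        have := List.findIdx?_eq_some_iff_findIdx_eq.mp hi
        omega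
      simp [List.length_eraseIdx, hk]
      omega

-- Port of B's while loop: m = min(spans, key=start); spans.remove(m);
-- out += text[pos:start] + replacement; pos = end; finally out + text[pos:].
-- (the .getD [] only totalises spans.remove — remove? is always some here, m ∈ spans)
def pvSelLoop (text : String) (spans : List (Int × Int × String)) (out : String) (pos : Int) : String :=
  match _h : PySem.List.min? spans (fun t => t.1) with
  | none => out ++ PySem.Str.slice text (some pos) none
  | some m =>
      pvSelLoop text ((PySem.List.remove? spans m).getD [])
        (out ++ PySem.Str.slice text (some pos) (some m.1) ++ m.2.2) m.2.1
termination_by spans.length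
decreasing_by
  exact pvRemoveLen spans m (by rintro rfl; simp [PySem.List.min?] at _h)

def apply_span_replacements_py_alt (text : String) (replacements : List (Int × Int × String)) : String :=
  pvSelLoop text replacements "" 0

-- ===== PRECONDITION & SPEC =====
def Spec_apply_span_replacements_py (text : String) (replacements : List (Int × Int × String)) (out : String) : Prop := out = apply_span_replacements_py_alt text replacements
instance (text : String) (replacements : List (Int × Int × String)) (out : String) : Decidable (Spec_apply_span_replacements_py text replacements out) := by unfold Spec_apply_span_replacements_py; infer_instance

-- ===== CLAIM (what is proved, stated in full; the proofs are below) =====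
def Claim_equal_apply_span_replacements_py : Prop := ∀ (text : String) (replacements : List (Int × Int × String)), Dom_apply_span_replacements_py text replacements → Spec_apply_span_replacements_py text replacements (apply_span_replacements_py text replacements)

-- ===== LEMMAS AND PROOFS =====

-- The canonical list of output pieces: from position c through the spans L, closing with text[c':b?].
def pvPieces (text : String) (b? : Option Int) : Int → List (Int × Int × String) → List String
  | c, [] => [PySem.Str.slice text (some c) b?]
  | c, (s, e, r) :: L => PySem.Str.slice text (some c) (some s) :: r :: pvPieces text b? e L

theorem pvStrSlice_none_start (text : String) (b? : Option Int) :
    PySem.Str.slice text none b? = PySem.Str.slice text (some 0) b? := by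
  simp [PySem.Str.slice, PySem.Chars.slice_eq_listSlice, PySem.List.slice_zero_start]

theorem pvStrSlice_len_stop (text : String) (a : Int) :
    PySem.Str.slice text (some a) (some (text.toList.length : Int)) = PySem.Str.slice text (some a) none := by
  unfold PySem.Str.slice
  congr 1
  simp only [PySem.Chars.slice_eq_listSlice, PySem.List.slice, PySem.List.clampIdx_natCast, min_self]

theorem pvPieces_len_eq_none (text : String) :
    ∀ (L : List (Int × Int × String)) (c : Int),
      pvPieces text (some (text.toList.length : Int)) c L = pvPieces text none c L := by
  intro L
  induction L with
  | nil => intro c; simp only [pvPieces]; rw [pvStrSlice_len_stop]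
  | cons hd tl ih =>
      intro c
      obtain ⟨s, e, r⟩ := hd
      simp only [pvPieces, ih]

-- A's loop (as a foldr after List.foldl_reverse): reversing the accumulated parts and
-- prepending the closing slice yields the same pieces, closed at c0.
theorem pvA_foldr (text : String) :
    ∀ (L : List (Int × Int × String)) (c0 c : Int),
      PySem.Str.slice text (some c)
          (some ((L.foldr (fun r (acc : List String × Int) =>
            (acc.1 ++ [PySem.Str.slice text (some r.2.1) (some acc.2), r.2.2], r.1)) ([], c0)).2))
        :: ((L.foldr (fun r (acc : List String × Int) =>
            (acc.1 ++ [PySem.Str.slice text (some r.2.1) (some acc.2), r.2.2], r.1)) ([], c0)).1).reverse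
      = pvPieces text (some c0) c L := by
  intro L
  induction L with
  | nil => intro c0 c; simp [pvPieces]
  | cons hd tl ih =>
      intro c0 c
      obtain ⟨s, e, r⟩ := hd
      simp only [List.foldr_cons, pvPieces]
      rw [← ih c0 e]
      simp

theorem pvJoin_nil_toList (L : List String) :
    (PySem.Str.join "" L).toList = (L.map String.toList).flatten := by
  simp only [PySem.Str.join, String.toList_ofList]
  have h : ∀ (ps : List (List Char)), PySem.Chars.join [] ps = ps.flatten := by
    intro ps
    induction ps with
    | nil => rfl
    | cons a t ih =>
        cases t with
        | nil => simp [PySem.Chars.join_singleton]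
        | cons b u =>
            rw [PySem.Chars.join_cons_cons]
            simp [ih]
  have : ("" : String).toList = [] := rfl
  rw [this, h]

-- A's result is the join of the pieces over the stably sorted spans.
theorem pvA_eq (text : String) (replacements : List (Int × Int × String)) :
    apply_span_replacements_py text replacements
      = PySem.Str.join "" (pvPieces text none 0 (PySem.List.sorted replacements (fun r => r.1) false)) := by
  unfold apply_span_replacements_py
  by_cases h : replacements = []
  · subst h
    have h0 : PySem.List.sorted ([] : List (Int × Int × String)) (fun r => r.1) false = [] := rfl
    apply String.toList_inj.mp
    rw [h0, pvJoin_nil_toList]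
    simp [pvPieces, PySem.Str.slice, PySem.Chars.slice_eq_listSlice, PySem.List.slice_zero_start, PySem.List.slice_none_none]
  · simp only [h, ite_false]
    congr 1
    rw [PySem.Str.len_eq, List.foldl_reverse, List.reverse_append, List.reverse_singleton,
        List.singleton_append, pvStrSlice_none_start, pvA_foldr, pvPieces_len_eq_none]

-- min(spans, key=start) splits spans at its FIRST minimal element: everything before it has a
-- strictly larger start, everything after a larger-or-equal one.
def pvMinStep : Option (Int × Int × String) → (Int × Int × String) → Option (Int × Int × String) :=
  fun acc x => match acc with
    | none => some x
    | some m => if x.1 < m.1 then some x else some m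

theorem pvMin?_eq (xs : List (Int × Int × String)) :
    PySem.List.min? xs (fun t => t.1) = xs.foldl pvMinStep none := by
  unfold PySem.List.min?
  congr 1
  funext acc x
  cases acc <;> simp [pvMinStep]

theorem pvMinAux (xs : List (Int × Int × String)) :
    ∀ (c m : Int × Int × String),
      xs.foldl pvMinStep (some c) = some m →
      (m = c ∧ ∀ y ∈ xs, c.1 ≤ y.1) ∨
      (∃ pre suf, xs = pre ++ m :: suf ∧ m.1 < c.1 ∧ (∀ y ∈ pre, m.1 < y.1) ∧ (∀ y ∈ suf, m.1 ≤ y.1)) := by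
  induction xs with
  | nil => intro c m h; left; simp at h; simp [h]
  | cons x t ih =>
      intro c m h
      simp only [List.foldl_cons] at h
      by_cases hx : x.1 < c.1
      · rw [show pvMinStep (some c) x = some x by simp [pvMinStep, hx]] at h
        rcases ih x m h with ⟨rfl, hall⟩ | ⟨pre, suf, rfl, hlt, hpre, hsuf⟩
        · right; exact ⟨[], t, by simp, hx, by simp, hall⟩
        · right
          exact ⟨x :: pre, suf, by simp, lt_trans hlt hx,
            by intro y hy; rcases List.mem_cons.mp hy with rfl | hy; exact hlt; exact hpre y hy, hsuf⟩
      · rw [show pvMinStep (some c) x = some c by simp [pvMinStep, hx]] at h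
        rcases ih c m h with ⟨rfl, hall⟩ | ⟨pre, suf, rfl, hlt, hpre, hsuf⟩
        · left
          refine ⟨rfl, ?_⟩
          intro y hy
          rcases List.mem_cons.mp hy with rfl | hy
          · omega
          · exact hall y hy
        · right
          exact ⟨x :: pre, suf, by simp, hlt,
            by intro y hy; rcases List.mem_cons.mp hy with rfl | hy; omega; exact hpre y hy, hsuf⟩

theorem pvMin_split (xs : List (Int × Int × String)) (m : Int × Int × String)
    (h : PySem.List.min? xs (fun t => t.1) = some m) :
    ∃ pre suf, xs = pre ++ m :: suf ∧ (∀ y ∈ pre, m.1 < y.1) ∧ (∀ y ∈ suf, m.1 ≤ y.1) := by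
  cases xs with
  | nil => simp [PySem.List.min?] at h
  | cons x t =>
      have h' : t.foldl pvMinStep (some x) = some m := by
        rw [pvMin?_eq] at h
        simpa [List.foldl_cons, pvMinStep] using h
      rcases pvMinAux t x m h' with ⟨rfl, hall⟩ | ⟨pre, suf, rfl, _, hpre, hsuf⟩
      · exact ⟨[], t, rfl, by simp, hall⟩
      · exact ⟨x :: pre, suf, rfl,
          by intro y hy; rcases List.mem_cons.mp hy with rfl | hy; omega; exact hpre y hy, hsuf⟩

-- spans.remove(m) with m the first minimal element removes exactly that occurrence.
theorem pvRemove_split (pre suf : List (Int × Int × String)) (m : Int × Int × String)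
    (hpre : ∀ y ∈ pre, y ≠ m) :
    PySem.List.remove? (pre ++ m :: suf) m = some (pre ++ suf) := by
  unfold PySem.List.remove?
  have hidx : List.idxOf? m (pre ++ m :: suf) = some pre.length := by
    induction pre with
    | nil => simp [List.idxOf?_cons]
    | cons y t ih =>
        have hy : (y == m) = false := beq_eq_false_iff_ne.mpr (hpre y (by simp))
        simp only [List.cons_append, List.idxOf?_cons, hy,
          ih (fun z hz => hpre z (by simp [hz]))]
        rfl
  rw [hidx]
  simp only [Option.map_some]
  rw [List.eraseIdx_append_of_length_le (by omega)]
  simp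

theorem pvInsertBy_front (bf : (Int × Int × String) → (Int × Int × String) → Bool)
    (x : Int × Int × String) (ys : List (Int × Int × String))
    (h : ∀ y ∈ ys, bf x y = true) :
    PySem.List.insertBy bf x ys = x :: ys := by
  cases ys with
  | nil => rfl
  | cons y t => simp [PySem.List.insertBy, h y (by simp)]

theorem pvSortedSnoc (t : List (Int × Int × String)) (x : Int × Int × String) :
    PySem.List.sorted (t ++ [x]) (fun r => r.1) false
      = PySem.List.insertBy (fun a b => decide (a.1 < b.1)) x (PySem.List.sorted t (fun r => r.1) false) := by
  rw [PySem.List.sorted_eq_foldl_insertBy, PySem.List.sorted_eq_foldl_insertBy, List.foldl_append]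
  rfl

-- Stable selection = stable sort: extracting the first minimal-start span from spans and
-- consing it onto the stable sort of the rest IS the stable sort of spans.
theorem pvSorted_cons_min (m : Int × Int × String) :
    ∀ (suf pre : List (Int × Int × String)),
      (∀ y ∈ pre, m.1 < y.1) → (∀ y ∈ suf, m.1 ≤ y.1) →
      PySem.List.sorted (pre ++ m :: suf) (fun r => r.1) false
        = m :: PySem.List.sorted (pre ++ suf) (fun r => r.1) false := by
  intro suf
  induction suf using List.reverseRecOn with
  | nil =>
      intro pre hpre _
      have : pre ++ [m] = pre ++ [m] := rfl
      rw [List.append_nil, pvSortedSnoc]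
      exact pvInsertBy_front _ m _ (by
        intro y hy
        have : y ∈ pre := (PySem.List.mem_sorted _ _ _ _).mp hy
        simpa using hpre y this)
  | append_singleton suf' z ih =>
      intro pre hpre hsuf
      have hz : m.1 ≤ z.1 := hsuf z (by simp)
      have hsuf' : ∀ y ∈ suf', m.1 ≤ y.1 := fun y hy => hsuf y (by simp [hy])
      have e1 : pre ++ m :: (suf' ++ [z]) = (pre ++ m :: suf') ++ [z] := by simp
      have e2 : pre ++ (suf' ++ [z]) = (pre ++ suf') ++ [z] := by simp
      rw [e1, e2, pvSortedSnoc, pvSortedSnoc, ih pre hpre hsuf']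
      have hbf : (fun (a b : Int × Int × String) => decide (a.1 < b.1)) z m = false := by
        simp; omega
      simp [PySem.List.insertBy, hbf]


-- B's selection loop produces exactly the pieces of the stably sorted spans, in order.
theorem pvSelLoop_eq (text : String) :
    ∀ (n : Nat) (spans : List (Int × Int × String)), spans.length ≤ n →
      ∀ (out : String) (pos : Int),
        (pvSelLoop text spans out pos).toList
          = out.toList
            ++ ((pvPieces text none pos (PySem.List.sorted spans (fun r => r.1) false)).map String.toList).flatten := by
  intro n
  induction n with
  | zero =>
      intro spans hlen out pos
      have hs : spans = [] := List.eq_nil_of_length_eq_zero (by omega)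
      subst hs
      have h0 : PySem.List.sorted ([] : List (Int × Int × String)) (fun r => r.1) false = [] := rfl
      rw [pvSelLoop, h0]
      simp [pvPieces, PySem.List.min?, PySem.Str.slice, PySem.Chars.slice_eq_listSlice,
        String.toList_ofList, String.toList_append]
  | succ n ih =>
      intro spans hlen out pos
      cases h : PySem.List.min? spans (fun t => t.1) with
      | none =>
          have hs : spans = [] := (PySem.List.min?_eq_none_iff _ _).mp h
          subst hs
          have h0 : PySem.List.sorted ([] : List (Int × Int × String)) (fun r => r.1) false = [] := rfl
          rw [pvSelLoop, h0]
          simp [pvPieces, PySem.List.min?, PySem.Str.slice, PySem.Chars.slice_eq_listSlice,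
        String.toList_ofList, String.toList_append]
      | some m =>
          obtain ⟨pre, suf, rfl, hpre, hsuf⟩ := pvMin_split _ m h
          have hne : ∀ y ∈ pre, y ≠ m := by
            intro y hy heq
            have := hpre y hy
            subst heq; omega
          rw [pvSelLoop]
          split
          · rename_i heq; rw [heq] at h; cases h
          rename_i m' heq
          rw [heq] at h
          cases h
          rw [pvRemove_split pre suf m hne]
          simp only [Option.getD_some]
          have hlen' : (pre ++ suf).length ≤ n := by
            have := hlen; simp only [List.length_append, List.length_cons] at this ⊢; omega
          rw [ih (pre ++ suf) hlen'
              (out ++ PySem.Str.slice text (some pos) (some m.1) ++ m.2.2) m.2.1,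
            pvSorted_cons_min m suf pre hpre hsuf]
          simp [pvPieces, String.toList_append]

-- ===== VERDICT (by name: the statement is the Claim_ definition above) =====
theorem apply_span_replacements_py_spec : Claim_equal_apply_span_replacements_py := by
  intro text replacements _
  unfold Spec_apply_span_replacements_py
  apply String.toList_inj.mp
  rw [pvA_eq, pvJoin_nil_toList]
  unfold apply_span_replacements_py_alt
  rw [pvSelLoop_eq text replacements.length replacements (le_refl _) "" 0]
  rfl
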